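-- pv_equiv track=rewrite | github.com/adventcoder/adventofcode-2022 | gif.py | pack_bits
-- ===== SOURCE A (Python) =====
-- def pack_bits(sizes, values):
--     bits = 0
--     offset = sum(sizes)
--     for size, value in zip(sizes, values):
--         max_value = (1 << size) - 1
--         if not 0 <= value <= max_value:
--             raise ValueError('value {} out of range 0 <= value <= {}', value, max_value)
--         offset -= size
--         bits |= value << offset
--     return bits
-- ===== SOURCE B (Python) =====
-- def pack_bits(sizes, values):
--     chunks = []
--     used = 0
--     for size, value in zip(sizes, values):
--         max_value = (1 << size) - 1
--         if not 0 <= value <= max_value: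
--             raise ValueError('value {} out of range 0 <= value <= {}', value, max_value)
--         chunks.append(format(value, 'b').zfill(size) if size else '')
--         used += size
--     bitstr = ''.join(chunks) + '0' * (sum(sizes) - used)
--     return int(bitstr, 2) if bitstr else 0
-- ===== Notes on version B (the rewrite author's own statement) =====
-- stated objective: alternative
-- what changed: Instead of OR-ing shifted integers into an accumulator, B builds the packed result as a text representation: each value is rendered as a zero-padded binary string of its field width, the strings (plus trailing zeros for unconsumed sizes) are concatenated, and the result is parsed back with int(bitstr, 2).
import Mathlib
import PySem

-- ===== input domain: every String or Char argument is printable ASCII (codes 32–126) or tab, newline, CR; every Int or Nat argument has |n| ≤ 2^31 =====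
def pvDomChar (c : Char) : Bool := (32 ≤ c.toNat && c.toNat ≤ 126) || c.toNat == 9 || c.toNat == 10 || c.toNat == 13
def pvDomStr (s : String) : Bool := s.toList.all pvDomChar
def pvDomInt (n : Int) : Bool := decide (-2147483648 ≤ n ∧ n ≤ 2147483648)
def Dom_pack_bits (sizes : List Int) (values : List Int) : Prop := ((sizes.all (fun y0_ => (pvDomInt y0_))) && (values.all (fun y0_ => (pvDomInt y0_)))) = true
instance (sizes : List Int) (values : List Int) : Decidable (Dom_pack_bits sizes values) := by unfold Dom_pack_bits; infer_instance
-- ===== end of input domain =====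

-- B abandons integer shifting/OR-ing entirely: it renders each value as a zero-padded binary
-- string of its field width, concatenates the strings (plus trailing zeros for the unconsumed
-- sizes) and parses the result back in base 2; same validation, different representation.

-- ===== PORT A =====
-- loop over zip(sizes, values) carrying (offset, bits); the `raise` branch returns the
-- current bits (unreached inside Pre_); `value << offset` is ported as value * 2^offset.toNat
-- (exact for 0 ≤ offset, which Pre_ guarantees; Python raises on a negative shift count).
def packAloop (pairs : List (Int × Int)) (offset : Int) (bits : Int) : Int :=
  match pairs with
  | [] => bits
  | (size, value) :: rest =>
    let max_value : Int := 2 ^ size.toNat - 1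
    if ¬ (0 ≤ value ∧ value ≤ max_value) then bits
    else
      let offset' := offset - size
      packAloop rest offset' (PySem.Int.bor bits (value * 2 ^ offset'.toNat))

def pack_bits (sizes : List Int) (values : List Int) : Int :=
  packAloop (sizes.zip values) sizes.sum 0

-- ===== PORT B =====
-- strings are carried as List Char (the PySem character-list representation).
-- binDigits n = the digits Python's format(n,'b') produces for n > 0.
def binDigits (n : Nat) : List Char :=
  if h : n = 0 then []
  else binDigits (n / 2) ++ [if n % 2 = 1 then '1' else '0']
decreasing_by exact Nat.div_lt_self (Nat.pos_of_ne_zero h) one_lt_two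

-- format(v, 'b'), exact for 0 ≤ v (the only values B formats)
def pyFormatBin (v : Int) : List Char :=
  if v = 0 then ['0'] else binDigits v.toNat

-- s.zfill(w): pad with '0' on the left up to width w (unchanged if w ≤ len(s), incl. negative w)
def pyZfill (s : List Char) (w : Int) : List Char :=
  List.replicate (w - s.length).toNat '0' ++ s

-- format(value, 'b').zfill(size) if size else ''
def chunkOf (size value : Int) : List Char :=
  if size = 0 then [] else pyZfill (pyFormatBin value) size

-- int(s, 2) for a string of '0'/'1' digits (B's bitstr is one; the empty string is guarded)
def parseBin (s : List Char) : Int :=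
  s.foldl (fun acc c => acc * 2 + (if c = '1' then 1 else 0)) 0

-- the for-loop: carries (chunks, used)
def packBloop (pairs : List (Int × Int)) (chunks : List (List Char)) (used : Int) :
    List (List Char) × Int :=
  match pairs with
  | [] => (chunks, used)
  | (size, value) :: rest =>
    let max_value : Int := 2 ^ size.toNat - 1
    if ¬ (0 ≤ value ∧ value ≤ max_value) then (chunks, used)
    else packBloop rest (chunks ++ [chunkOf size value]) (used + size)

def pack_bits_alt (sizes : List Int) (values : List Int) : Int :=
  let r := packBloop (sizes.zip values) [] 0
  let bitstr := r.1.flatten ++ List.replicate (sizes.sum - r.2).toNat '0'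
  if bitstr.isEmpty then 0 else parseBin bitstr

-- ===== PRECONDITION & SPEC =====
-- Pre_ excludes exactly the inputs where Python A raises ValueError: a negative zipped size
-- (1 << size raises), a zipped value outside 0..2^size-1, or — when the zip is nonempty and
-- the trailing (unzipped) sizes are negative enough — a negative shift count mid-loop.
def Pre_pack_bits (sizes : List Int) (values : List Int) : Prop :=
  (∀ p ∈ sizes.zip values, 0 ≤ p.1 ∧ 0 ≤ p.2 ∧ p.2 ≤ 2 ^ p.1.toNat - 1) ∧
  (sizes.zip values ≠ [] → ((sizes.zip values).map Prod.fst).sum ≤ sizes.sum)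
instance (sizes : List Int) (values : List Int) : Decidable (Pre_pack_bits sizes values) := by
  unfold Pre_pack_bits; infer_instance

def pvWitness_pack_bits : List Int × List Int := ([3, 2, 4], [5, 1])

def Spec_pack_bits (sizes : List Int) (values : List Int) (out : Int) : Prop := out = pack_bits_alt sizes values
instance (sizes : List Int) (values : List Int) (out : Int) : Decidable (Spec_pack_bits sizes values out) := by unfold Spec_pack_bits; infer_instance

-- ===== CLAIM (what is proved, stated in full; the proofs are below) =====
def Claim_equal_pack_bits : Prop := ∀ (sizes : List Int) (values : List Int), Dom_pack_bits sizes values → Pre_pack_bits sizes values → Spec_pack_bits sizes values (pack_bits sizes values)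

-- ===== LEMMAS AND PROOFS =====

-- abbreviations used only by the proofs
def pairsValid (pairs : List (Int × Int)) : Prop :=
  ∀ p ∈ pairs, 0 ≤ p.1 ∧ 0 ≤ p.2 ∧ p.2 ≤ 2 ^ p.1.toNat - 1

def bitWidth (pairs : List (Int × Int)) : Nat := (pairs.map (fun p => p.1.toNat)).sum

def packedVal : List (Int × Int) → Int
  | [] => 0
  | (_, v) :: rest => v * 2 ^ bitWidth rest + packedVal rest

-- parseBin generalities -----------------------------------------------------
lemma parseBin_foldl (s : List Char) : ∀ acc : Int,
    s.foldl (fun acc c => acc * 2 + (if c = '1' then 1 else 0)) acc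
      = acc * 2 ^ s.length + parseBin s := by
  induction s with
  | nil => intro acc; simp [parseBin]
  | cons c t ih =>
    intro acc
    simp only [List.foldl_cons, parseBin, List.length_cons]
    rw [ih, ih ((0 : Int) * 2 + _)]
    ring

lemma parseBin_append (a b : List Char) :
    parseBin (a ++ b) = parseBin a * 2 ^ b.length + parseBin b := by
  unfold parseBin
  rw [List.foldl_append]
  exact parseBin_foldl b _

lemma parseBin_replicate (k : Nat) : parseBin (List.replicate k '0') = 0 := by
  induction k with
  | zero => simp [parseBin]
  | succ n ih =>
    simpa [List.replicate_succ, parseBin] using ih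

lemma parseBin_binDigits (n : Nat) : parseBin (binDigits n) = n := by
  induction n using Nat.strong_induction_on with
  | _ n ih =>
    rw [binDigits]
    by_cases h : n = 0
    · simp [h, parseBin]
    · simp only [h, dite_false]
      rw [parseBin_append]
      have := ih (n / 2) (Nat.div_lt_self (Nat.pos_of_ne_zero h) one_lt_two)
      rw [this]
      by_cases h2 : n % 2 = 1 <;> simp [h2, parseBin] <;> omega

lemma binDigits_length_le (k : Nat) : ∀ n : Nat, n < 2 ^ k → (binDigits n).length ≤ k := by
  induction k with
  | zero =>
    intro n hn
    have : n = 0 := by omega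
    rw [this, binDigits]; simp
  | succ k ih =>
    intro n hn
    rw [binDigits]
    by_cases h : n = 0
    · simp [h]
    · simp only [h, dite_false, List.length_append, List.length_cons, List.length_nil]
      have hdiv : n / 2 < 2 ^ k := by
        have : 2 ^ (k + 1) = 2 * 2 ^ k := by ring
        omega
      have := ih (n / 2) hdiv
      omega

-- one chunk: width and value ------------------------------------------------
lemma chunkOf_spec (s v : Int) (hs : 0 ≤ s) (h0 : 0 ≤ v) (hlt : v ≤ 2 ^ s.toNat - 1) :
    (chunkOf s v).length = s.toNat ∧ parseBin (chunkOf s v) = v := by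
  by_cases hz : s = 0
  · have hv : v = 0 := by simp [hz] at hlt; omega
    simp [chunkOf, hz, hv, parseBin]
  · have hs1 : 1 ≤ s.toNat := by omega
    have hpow : 0 < (2 : Int) ^ s.toNat := by positivity
    have hlen : (pyFormatBin v).length ≤ s.toNat := by
      unfold pyFormatBin
      by_cases hv0 : v = 0
      · simp [hv0]; omega
      · simp only [hv0, if_false]
        have : v.toNat < 2 ^ s.toNat := by
          have h2 : (2 : Int) ^ s.toNat = ((2 ^ s.toNat : Nat) : Int) := by push_cast; ring
          omega
        exact binDigits_length_le s.toNat v.toNat this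
    have hparse : parseBin (pyFormatBin v) = v := by
      unfold pyFormatBin
      by_cases hv0 : v = 0
      · simp [hv0, parseBin]
      · simp only [hv0, if_false]
        rw [parseBin_binDigits]
        omega
    constructor
    · simp only [chunkOf, hz, if_false, pyZfill, List.length_append, List.length_replicate]
      omega
    · simp only [chunkOf, hz, if_false, pyZfill]
      rw [parseBin_append, parseBin_replicate]
      simpa using hparse

-- the B loop, closed form ---------------------------------------------------
lemma packBloop_spec (pairs : List (Int × Int)) :
    ∀ chunks used, pairsValid pairs →
    packBloop pairs chunks used =
      (chunks ++ pairs.map (fun p => chunkOf p.1 p.2), used + (pairs.map Prod.fst).sum) := by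
  induction pairs with
  | nil => intro chunks used _; simp [packBloop]
  | cons p rest ih =>
    obtain ⟨s, v⟩ := p
    intro chunks used hvalid
    obtain ⟨_, hv0, hvlt⟩ := hvalid (s, v) (List.mem_cons_self ..)
    simp only [packBloop, hv0, hvlt, and_self, not_true_eq_false, if_false]
    rw [ih _ _ (fun q hq => hvalid q (List.mem_cons_of_mem _ hq))]
    refine Prod.ext ?_ ?_
    · simp
    · simp only [List.map_cons, List.sum_cons]
      omega

-- the concatenated chunks carry exactly packedVal over bitWidth bits ---------
lemma flatten_chunks_spec (pairs : List (Int × Int)) (hvalid : pairsValid pairs) :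
    (pairs.map (fun p => chunkOf p.1 p.2)).flatten.length = bitWidth pairs ∧
    parseBin (pairs.map (fun p => chunkOf p.1 p.2)).flatten = packedVal pairs := by
  induction pairs with
  | nil => simp [bitWidth, packedVal, parseBin]
  | cons p rest ih =>
    obtain ⟨s, v⟩ := p
    obtain ⟨hs, hv0, hvlt⟩ := hvalid (s, v) (List.mem_cons_self ..)
    obtain ⟨ihlen, ihval⟩ := ih (fun q hq => hvalid q (List.mem_cons_of_mem _ hq))
    obtain ⟨clen, cval⟩ := chunkOf_spec s v hs hv0 hvlt
    simp only [List.map_cons, List.flatten_cons]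
    constructor
    · simp [clen, ihlen, bitWidth]
    · rw [parseBin_append, ihlen, cval, ihval]
      simp [packedVal]

-- Int bitwise-or facts -------------------------------------------------------
lemma bor_mul_pow (a b : Int) (t : Nat) (ha : 0 ≤ a) (hb : 0 ≤ b) :
    PySem.Int.bor a b * 2 ^ t = PySem.Int.bor (a * 2 ^ t) (b * 2 ^ t) := by
  obtain ⟨m, rfl⟩ := Int.eq_ofNat_of_zero_le ha
  obtain ⟨n, rfl⟩ := Int.eq_ofNat_of_zero_le hb
  have h1 : ((m : Int) * 2 ^ t) = ((m * 2 ^ t : Nat) : Int) := by push_cast; ring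
  have h2 : ((n : Int) * 2 ^ t) = ((n * 2 ^ t : Nat) : Int) := by push_cast; ring
  rw [h1, h2, PySem.Int.bor_natCast, PySem.Int.bor_natCast]
  have h3 : (m ||| n) * 2 ^ t = m * 2 ^ t ||| n * 2 ^ t := by
    simpa [Nat.shiftLeft_eq] using (Nat.shiftLeft_or_distrib (a := m) (b := n) (i := t))
  exact_mod_cast congrArg (Nat.cast : Nat → Int) h3

-- a * 2^k ||| b = a * 2^k + b when 0 ≤ b < 2^k (the fields are disjoint)
lemma bor_disjoint_add (a b : Int) (k : Nat) (ha : 0 ≤ a) (hb : 0 ≤ b) (hlt : b < 2 ^ k) :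
    PySem.Int.bor (a * 2 ^ k) b = a * 2 ^ k + b := by
  obtain ⟨m, rfl⟩ := Int.eq_ofNat_of_zero_le ha
  obtain ⟨n, rfl⟩ := Int.eq_ofNat_of_zero_le hb
  have hn : n < 2 ^ k := by exact_mod_cast hlt
  have h1 : ((m : Int) * 2 ^ k) = ((2 ^ k * m : Nat) : Int) := by push_cast; ring
  rw [h1, PySem.Int.bor_natCast]
  have := (Nat.two_pow_add_eq_or_of_lt (b := n) hn m).symm
  rw [this]
  push_cast; ring

-- A's loop equals packedVal, realigned to the running offset -----------------
lemma packAloop_spec (pairs : List (Int × Int)) :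
    ∀ (offset acc : Int), pairsValid pairs →
      (pairs.map Prod.fst).sum ≤ offset → 0 ≤ acc →
      packAloop pairs offset (acc * 2 ^ offset.toNat) =
        (acc * 2 ^ bitWidth pairs + packedVal pairs) *
          2 ^ (offset - (pairs.map Prod.fst).sum).toNat := by
  induction pairs with
  | nil =>
    intro offset acc _ _ _
    simp [packAloop, bitWidth, packedVal]
  | cons p rest ih =>
    obtain ⟨s, v⟩ := p
    intro offset acc hvalid hoff hacc
    obtain ⟨hs, hv0, hvlt⟩ := hvalid (s, v) (List.mem_cons_self ..)
    have hvalid' : pairsValid rest := fun q hq => hvalid q (List.mem_cons_of_mem _ hq)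
    have hrest0 : 0 ≤ (rest.map Prod.fst).sum := by
      apply List.sum_nonneg; intro x hx
      simp only [List.mem_map] at hx
      obtain ⟨q, hq, rfl⟩ := hx
      exact (hvalid' q hq).1
    have hrest : (rest.map Prod.fst).sum ≤ offset - s := by
      simp [List.sum_cons] at hoff; omega
    have hoff' : 0 ≤ offset - s := le_trans hrest0 hrest
    simp only [packAloop, hv0, hvlt, and_self, not_true_eq_false, if_false]
    have hsplit : offset.toNat = s.toNat + (offset - s).toNat := by omega
    have hpos : 0 < (2 : Int) ^ s.toNat := by positivity
    have hacc' : 0 ≤ acc * 2 ^ s.toNat := by positivity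
    have hbits :
        PySem.Int.bor (acc * 2 ^ offset.toNat) (v * 2 ^ (offset - s).toNat) =
          (acc * 2 ^ s.toNat + v) * 2 ^ (offset - s).toNat := by
      have h1 : acc * 2 ^ offset.toNat = (acc * 2 ^ s.toNat) * 2 ^ (offset - s).toNat := by
        rw [hsplit, pow_add]; ring
      have hvlt2 : v < 2 ^ s.toNat := by
        have h3 : v ≤ 2 ^ s.toNat - 1 := by simpa using hvlt
        omega
      rw [h1, ← bor_mul_pow _ _ _ hacc' hv0, bor_disjoint_add _ _ _ hacc hv0 hvlt2]
    rw [hbits]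
    have hacc2 : 0 ≤ acc * 2 ^ s.toNat + v := by positivity
    rw [ih (offset - s) (acc * 2 ^ s.toNat + v) hvalid' hrest hacc2]
    have hW : bitWidth ((s, v) :: rest) = s.toNat + bitWidth rest := by
      simp [bitWidth]
    have hS : (((s, v) :: rest).map Prod.fst).sum = s + (rest.map Prod.fst).sum := by
      simp [List.sum_cons]
    rw [hW, hS]
    have harg : (offset - s - (rest.map Prod.fst).sum).toNat
        = (offset - (s + (rest.map Prod.fst).sum)).toNat := by omega
    rw [harg]
    congr 1
    simp only [packedVal, pow_add]
    ring

-- ===== VERDICT (by name: the statement is the Claim_ definition above) =====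
theorem pack_bits_spec : Claim_equal_pack_bits := by
  intro sizes values _ hpre
  obtain ⟨hvalid, htail⟩ := hpre
  unfold Spec_pack_bits pack_bits pack_bits_alt
  rw [packBloop_spec (sizes.zip values) [] 0 hvalid]
  simp only [List.nil_append, Int.zero_add]
  obtain ⟨hflen, hfval⟩ := flatten_chunks_spec (sizes.zip values) hvalid
  set flat := ((sizes.zip values).map (fun p => chunkOf p.1 p.2)).flatten with hflat
  set rem := (sizes.sum - ((sizes.zip values).map Prod.fst).sum).toNat with hrem
  have hbits : parseBin (flat ++ List.replicate rem '0') = packedVal (sizes.zip values) * 2 ^ rem := by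
    rw [parseBin_append, parseBin_replicate, List.length_replicate, hfval]; ring
  have hguard : (if (flat ++ List.replicate rem '0').isEmpty then (0 : Int)
      else parseBin (flat ++ List.replicate rem '0')) = packedVal (sizes.zip values) * 2 ^ rem := by
    by_cases he : (flat ++ List.replicate rem '0').isEmpty
    · rw [if_pos he]
      rw [List.isEmpty_iff] at he
      rw [← hbits, he]
      simp [parseBin]
    · rw [if_neg he]; exact hbits
  rw [hguard]
  by_cases hz : sizes.zip values = []
  · simp [hz, packAloop, packedVal]
  · have := packAloop_spec (sizes.zip values) sizes.sum 0 hvalid (htail hz) le_rfl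
    simpa using this
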